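-- pv_equiv track=rewrite | github.com/p-lots/codewars | 7-kyu/reverse-factorials/python/solution.py | reverse_factorial
-- ===== SOURCE A (Python) =====
-- def reverse_factorial(num):
--     if num == 1:
--         return '1!'
--     ret = 1
--     fac = 1
--     while fac < num:
--         fac *= ret
--         ret += 1
--     return f'{ret - 1}!' if fac == num else 'None'
-- ===== SOURCE B (Python) =====
-- def _peel(n, i):
--     # strip successive factors 2, 3, ... off n; return the leftover and next index
--     if n % i == 0:
--         return _peel(n // i, i + 1)
--     return (n, i)
--
--
-- def reverse_factorial(num):
--     if num < 1:
--         return 'None'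
--     n, i = _peel(num, 2)
--     return f'{i - 1}!' if n == 1 else 'None'
-- ===== Notes on version B (the rewrite author's own statement) =====
-- stated objective: alternative
-- what changed: B recursively divides num down by successively larger counters until one fails to divide (so num is a factorial iff the leftover is 1), instead of A's loop that multiplies factorials up until they reach num; B needs no special case for num == 1.
import Mathlib
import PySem

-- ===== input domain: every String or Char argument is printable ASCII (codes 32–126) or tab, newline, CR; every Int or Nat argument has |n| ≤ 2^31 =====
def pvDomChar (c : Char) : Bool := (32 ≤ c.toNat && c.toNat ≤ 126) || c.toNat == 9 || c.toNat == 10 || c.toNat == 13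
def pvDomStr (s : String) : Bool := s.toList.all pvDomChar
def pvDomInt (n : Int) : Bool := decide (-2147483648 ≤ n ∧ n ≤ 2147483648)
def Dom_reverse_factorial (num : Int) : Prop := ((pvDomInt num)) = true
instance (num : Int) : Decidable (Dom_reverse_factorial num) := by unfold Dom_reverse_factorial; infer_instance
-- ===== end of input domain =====

-- B recursively trial-divides num downward by successively larger counters instead of A's loop building factorials upward; same return value, no speed claim.

-- ===== PORT A =====
-- while fac < num: fac *= ret; ret += 1
-- fuel is only a totality guard: num.toNat + 2 strictly exceeds the iteration count
-- (proved in loopA_run below), so the fuel-0 branch is never reached from reverse_factorial.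
def loopA (fuel : ℕ) (num fac ret : Int) : Int × Int :=
  match fuel with
  | 0 => (fac, ret)
  | f+1 => if fac < num then loopA f num (fac * ret) (ret + 1) else (fac, ret)

def reverse_factorial (num : Int) : String :=
  if num = 1 then "1!"
  else
    let p := loopA (num.toNat + 2) num 1 1
    if p.1 = num then PySem.Int.toStr (p.2 - 1) ++ "!" else "None"

-- ===== PORT B =====
-- Python helper _peel(n, i): if n % i == 0: return _peel(n // i, i + 1); return (n, i).
-- Well-founded recursion on n.toNat; the extra '2 ≤ i ∧ 1 ≤ n' in the guard is purely a
-- totality guard (it holds on every call reached from reverse_factorial_alt, where num ≥ 1).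
def peel (n i : Int) : Int × Int :=
  if h : 2 ≤ i ∧ 1 ≤ n ∧ PySem.Int.mod n i = 0 then
    peel (PySem.Int.floordiv n i) (i + 1)
  else (n, i)
termination_by n.toNat
decreasing_by
  obtain ⟨hi, hn, hm⟩ := h
  have hdvd : i ∣ n := (PySem.Int.mod_eq_zero_iff_dvd _ _).mp hm
  have hfd : PySem.Int.floordiv n i = n / i := PySem.Int.floordiv_eq_ediv_of_pos (by omega)
  obtain ⟨t, ht⟩ := hdvd
  have hq : n / i = t := by rw [ht]; exact Int.mul_ediv_cancel_left t (by omega)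
  have ht1 : 1 ≤ t := by nlinarith
  have htn : t < n := by nlinarith
  omega

def reverse_factorial_alt (num : Int) : String :=
  if num < 1 then "None"
  else
    let p := peel num 2
    if p.1 = 1 then PySem.Int.toStr (p.2 - 1) ++ "!" else "None"

-- ===== PRECONDITION & SPEC =====
def Spec_reverse_factorial (num : Int) (out : String) : Prop := out = reverse_factorial_alt num
instance (num : Int) (out : String) : Decidable (Spec_reverse_factorial num out) := by unfold Spec_reverse_factorial; infer_instance

-- ===== CLAIM (what is proved, stated in full; the proofs are below) =====
def Claim_equal_reverse_factorial : Prop := ∀ (num : Int), Dom_reverse_factorial num → Spec_reverse_factorial num (reverse_factorial num)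

-- ===== LEMMAS AND PROOFS =====

-- A's loop, started at fac = r!, ret = r+1 with enough fuel, stops exactly at the
-- least m ≥ r with num ≤ m!.
lemma loopA_run (num : Int) (m : ℕ) (hm : num ≤ (m.factorial : Int))
    (hmin : ∀ j : ℕ, j < m → (j.factorial : Int) < num) :
    ∀ (fuel r : ℕ), m - r ≤ fuel → r ≤ m →
      loopA fuel num (r.factorial : Int) ((r:Int)+1) = ((m.factorial : Int), (m:Int)+1) := by
  intro fuel
  induction fuel with
  | zero =>
    intro r hfu hrm
    have hrm' : r = m := by omega
    subst hrm'
    rfl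
  | succ f IH =>
    intro r hfu hrm
    by_cases hrm' : r = m
    · subst hrm'
      simp only [loopA, if_neg (not_lt.mpr hm)]
    · have hlt : r < m := lt_of_le_of_ne hrm hrm'
      simp only [loopA, if_pos (hmin r hlt)]
      have e1 : (r.factorial : Int) * ((r:Int)+1) = ((r+1).factorial : Int) := by
        push_cast [Nat.factorial_succ]; ring
      have e2 : ((r:Int)+1)+1 = ((r+1:ℕ):Int)+1 := by push_cast; ring
      rw [e1, e2]
      exact IH (r+1) (by omega) (by omega)

lemma fact_lt_of_lt (j k : ℕ) (hk : 2 ≤ k) (hj : j < k) : j.factorial < k.factorial := by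
  rcases Nat.eq_zero_or_pos j with h0 | h1
  · subst h0
    have := Nat.self_le_factorial k
    simpa [Nat.factorial] using by omega
  · exact (Nat.factorial_lt h1).mpr hj

lemma A_fact (k : ℕ) (hk : 2 ≤ k) :
    reverse_factorial (k.factorial : Int) = PySem.Int.toStr (k : Int) ++ "!" := by
  have hk2 : 2 ≤ k.factorial := le_trans hk (Nat.self_le_factorial k)
  have hkf : k ≤ k.factorial := Nat.self_le_factorial k
  have hmin : ∀ j : ℕ, j < k → (j.factorial : Int) < (k.factorial : Int) := by
    intro j hj; exact_mod_cast fact_lt_of_lt j k hk hj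
  have htn : ((k.factorial : Int)).toNat = k.factorial := by
    exact_mod_cast Int.toNat_natCast k.factorial
  have hrun := loopA_run (k.factorial : Int) k le_rfl hmin (((k.factorial : Int)).toNat + 2) 0
    (by omega) (by omega)
  unfold reverse_factorial
  rw [if_neg (by exact_mod_cast by omega)]
  simp only [Nat.factorial_zero, Nat.cast_one, Nat.cast_zero, zero_add] at hrun
  rw [hrun]
  simp

lemma A_none (num : Int) (h2 : 2 ≤ num) (h : ∀ k : ℕ, (k.factorial : Int) ≠ num) :
    reverse_factorial num = "None" := by
  have hN : ((num.toNat : ℕ) : Int) = num := Int.toNat_of_nonneg (by omega)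
  have hex : ∃ m : ℕ, num ≤ (m.factorial : Int) := by
    refine ⟨num.toNat, ?_⟩
    have h1 := Nat.self_le_factorial num.toNat
    calc num = (num.toNat : Int) := hN.symm
      _ ≤ (num.toNat.factorial : Int) := by exact_mod_cast h1
  have hm := Nat.find_spec hex
  have hmin : ∀ j : ℕ, j < Nat.find hex → (j.factorial : Int) < num := by
    intro j hj
    have := Nat.find_min hex hj
    omega
  have hfind : Nat.find hex ≤ num.toNat := Nat.find_min' hex (by
    have h1 := Nat.self_le_factorial num.toNat
    calc num = (num.toNat : Int) := hN.symm
      _ ≤ (num.toNat.factorial : Int) := by exact_mod_cast h1)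
  have hrun := loopA_run num (Nat.find hex) hm hmin (num.toNat + 2) 0 (by omega) (by omega)
  unfold reverse_factorial
  rw [if_neg (by omega)]
  simp only [Nat.factorial_zero, Nat.cast_one, Nat.cast_zero, zero_add] at hrun
  rw [hrun]
  simp only
  rw [if_neg (h _)]

-- B's recursion preserves n * (i-1)! and stops at the first non-divisor.
lemma peel_run : ∀ (n : ℕ), ∀ (i : ℕ), 1 ≤ n → 2 ≤ i →
    ∃ n' i' : ℕ, peel (n:Int) (i:Int) = ((n':Int), (i':Int)) ∧
      n' * (i'-1).factorial = n * (i-1).factorial ∧ ¬ (i' ∣ n') ∧ 2 ≤ i' ∧ 1 ≤ n' := by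
  intro n
  induction n using Nat.strong_induction_on with
  | _ n IH =>
    intro i hn1 hi2
    by_cases h : PySem.Int.mod (n:Int) (i:Int) = 0
    · have hdvd : (i:Int) ∣ (n:Int) := (PySem.Int.mod_eq_zero_iff_dvd _ _).mp h
      have hdvdN : i ∣ n := by exact_mod_cast hdvd
      obtain ⟨t, ht⟩ := hdvdN
      have ht1 : 1 ≤ t := by
        rcases Nat.eq_zero_or_pos t with h0 | h1
        · subst h0; simp at ht; omega
        · exact h1
      have htn : t < n := by nlinarith
      have hfd : PySem.Int.floordiv (n:Int) (i:Int) = ((n / i : ℕ) : Int) := by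
        exact_mod_cast PySem.Int.floordiv_natCast n i
      have hni : n / i = t := by rw [ht]; exact Nat.mul_div_cancel_left t (by omega)
      rw [peel, dif_pos ⟨by exact_mod_cast hi2, by exact_mod_cast hn1, h⟩]
      have e2 : ((i:Int)+1) = ((i+1:ℕ):Int) := by push_cast; ring
      rw [hfd, hni, e2]
      obtain ⟨n', i', heq, hprod, hnd, hi', hn'⟩ := IH t htn (i+1) ht1 (by omega)
      refine ⟨n', i', heq, ?_, hnd, hi', hn'⟩
      have hfi : (i+1-1).factorial = i * (i-1).factorial := by
        have hii : i + 1 - 1 = (i-1) + 1 := by omega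
        rw [hii, Nat.factorial_succ]
        congr 1
        omega
      calc n' * (i'-1).factorial = t * (i+1-1).factorial := hprod
        _ = t * (i * (i-1).factorial) := by rw [hfi]
        _ = (i * t) * (i-1).factorial := by ring
        _ = n * (i-1).factorial := by rw [← ht]
    · rw [peel, dif_neg (fun hc => h hc.2.2)]
      refine ⟨n, i, rfl, rfl, ?_, hi2, hn1⟩
      intro hdvd
      exact h ((PySem.Int.mod_eq_zero_iff_dvd _ _).mpr (by exact_mod_cast hdvd))

-- if n' * (i'-1)! = k! with i' ∤ n', then n' = 1 and i' = k+1
lemma B_final (k n' i' : ℕ) (hk : 2 ≤ k) (hprod : n' * (i'-1).factorial = k.factorial)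
    (hnd : ¬ (i' ∣ n')) (hi' : 2 ≤ i') (hn' : 1 ≤ n') : n' = 1 ∧ i' = k + 1 := by
  by_cases hik : i' ≤ k
  · exfalso
    have hdvd : i'.factorial ∣ k.factorial := Nat.factorial_dvd_factorial hik
    obtain ⟨c, hc⟩ := hdvd
    have hfi : i'.factorial = i' * (i'-1).factorial := by
      have hii : i' = (i'-1) + 1 := by omega
      rw [hii, Nat.factorial_succ]
      congr 2
    have hcancel : n' = i' * c := by
      have hpos : 0 < (i'-1).factorial := Nat.factorial_pos _
      have heq : n' * (i'-1).factorial = (i' * c) * (i'-1).factorial := by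
        rw [hprod, hc, hfi]; ring
      exact Nat.eq_of_mul_eq_mul_right hpos heq
    exact hnd ⟨c, hcancel⟩
  · have hge : k ≤ i' - 1 := by omega
    have hfge : k.factorial ≤ (i'-1).factorial := Nat.factorial_le hge
    have hpos : 0 < (i'-1).factorial := Nat.factorial_pos _
    have hn1 : n' = 1 := by nlinarith
    subst hn1
    have hfe : (i'-1).factorial = k.factorial := by omega
    have hik2 : i' - 1 = k := by
      rcases Nat.lt_or_ge (i'-1) 2 with hlt | hge2
      · interval_cases h : (i' - 1)
        · simp [Nat.factorial] at hfe
          have := Nat.self_le_factorial k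
          omega
        · simp [Nat.factorial] at hfe
          have := Nat.self_le_factorial k
          omega
      · exact (Nat.factorial_inj (by omega)).mp hfe
    exact ⟨rfl, by omega⟩

lemma B_fact (k : ℕ) (hk : 2 ≤ k) :
    reverse_factorial_alt (k.factorial : Int) = PySem.Int.toStr (k : Int) ++ "!" := by
  have hk2 : 2 ≤ k.factorial := le_trans hk (Nat.self_le_factorial k)
  unfold reverse_factorial_alt
  rw [if_neg (by exact_mod_cast by omega)]
  obtain ⟨n', i', heq, hprod, hnd, hi', hn'⟩ := peel_run k.factorial 2 (by omega) le_rfl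
  have hprod' : n' * (i'-1).factorial = k.factorial := by simpa [Nat.factorial] using hprod
  obtain ⟨hn1, hik⟩ := B_final k n' i' hk hprod' hnd hi' hn'
  subst hn1
  have hrw : peel ((k.factorial : ℕ) : Int) (2:Int) = ((1:Int), (i':Int)) := by
    exact_mod_cast heq
  have hi1 : (i':Int) - 1 = (k:Int) := by push_cast [hik]; ring
  rw [hrw, if_pos rfl, hi1]

lemma B_none (num : Int) (h2 : 2 ≤ num) (h : ∀ k : ℕ, (k.factorial : Int) ≠ num) :
    reverse_factorial_alt num = "None" := by
  have hN : ((num.toNat : ℕ) : Int) = num := Int.toNat_of_nonneg (by omega)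
  unfold reverse_factorial_alt
  rw [if_neg (by omega)]
  obtain ⟨n', i', heq, hprod, hnd, hi', hn'⟩ := peel_run num.toNat 2 (by omega) le_rfl
  have hprod' : n' * (i'-1).factorial = num.toNat := by simpa [Nat.factorial] using hprod
  rw [hN] at heq
  have heq2 : peel num 2 = ((n':Int), (i':Int)) := by exact_mod_cast heq
  rw [heq2]
  simp only
  rw [if_neg]
  intro hc
  have hn1 : n' = 1 := by exact_mod_cast hc
  subst hn1
  exact h (i'-1) (by rw [hprod'.symm] at hN; omega)

lemma B_one : reverse_factorial_alt 1 = "1!" := by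
  have hp : peel 1 2 = (1, 2) := by
    rw [peel, dif_neg (by decide)]
  unfold reverse_factorial_alt
  rw [hp]
  decide

-- ===== VERDICT (by name: the statement is the Claim_ definition above) =====
theorem reverse_factorial_spec : Claim_equal_reverse_factorial := by
  intro num _
  unfold Spec_reverse_factorial
  by_cases h1 : num = 1
  · subst h1
    rw [B_one]
    decide
  · by_cases h0 : num < 1
    · have hA : reverse_factorial num = "None" := by
        unfold reverse_factorial
        rw [if_neg h1]
        simp only [loopA, if_neg (by omega : ¬ (1:Int) < num)]
        rw [if_neg (by omega)]
      have hB : reverse_factorial_alt num = "None" := by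
        unfold reverse_factorial_alt; rw [if_pos h0]
      rw [hA, hB]
    · have h2 : 2 ≤ num := by omega
      by_cases hf : ∃ k : ℕ, (k.factorial : Int) = num
      · obtain ⟨k, hk⟩ := hf
        have hk2 : 2 ≤ k := by
          by_contra hc
          interval_cases k <;> simp [Nat.factorial] at hk <;> omega
        rw [← hk, A_fact k hk2, B_fact k hk2]
      · simp only [not_exists] at hf
        rw [A_none num h2 hf, B_none num h2 hf]
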